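-- pv_equiv track=rewrite | github.com/intel/intel-xpu-backend-for-triton | benchmarks/triton_kernels_benchmark/flex_attention_benchmark_custom_masks.py | count_natten_pairs
-- ===== SOURCE A (Python) =====
-- G_H = 128
--
-- G_W = 128
--
-- K_H = 13
--
-- K_W = 13
--
-- def get_x_y(idx):
--     return idx // G_W, idx % G_W
--
-- def count_natten_pairs(N):
--     count = 0
--
--     for q_idx in range(N):
--         q_x, q_y = get_x_y(q_idx)
--         kernel_x = min(max(q_x, K_W // 2), (G_W - 1) - K_W // 2)
--         kernel_y = min(max(q_y, K_H // 2), (G_H - 1) - K_H // 2)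
--
--         for kv_idx in range(N):
--             kv_x, kv_y = get_x_y(kv_idx)
--             hori_mask = abs(kernel_x - kv_x) <= K_W // 2
--             vert_mask = abs(kernel_y - kv_y) <= K_H // 2
--             if hori_mask & vert_mask:
--                 count += 1
--
--     return count
-- ===== SOURCE B (Python) =====
-- G_H = 128
--
-- G_W = 128
--
-- K_H = 13
--
-- K_W = 13
--
-- def count_natten_pairs(N):
--     count = 0
--     r_k = K_W // 2
--     r_h = K_H // 2
--     for q_idx in range(N):
--         q_x, q_y = q_idx // G_W, q_idx % G_W
--         kernel_x = min(max(q_x, r_k), (G_W - 1) - r_k)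
--         kernel_y = min(max(q_y, r_h), (G_H - 1) - r_h)
--         c0 = kernel_y - r_h
--         # keys passing the mask for this query are, per grid row r in
--         # [kernel_x - r_k, kernel_x + r_k], the contiguous index block
--         # [r*G_W + c0, r*G_W + c0 + K_H - 1]; count those below N in O(1).
--         for r in range(kernel_x - r_k, kernel_x + r_k + 1):
--             count += min(max(N - (r * G_W + c0), 0), K_H)
--     return count
-- ===== Notes on version B (the rewrite author's own statement) =====
-- stated objective: faster
-- what changed: Replaces the inner scan over all N keys by a closed-form count of the in-mask index block of each grid row of the query's box, so each query costs O(1) instead of O(N).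
import Mathlib
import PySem

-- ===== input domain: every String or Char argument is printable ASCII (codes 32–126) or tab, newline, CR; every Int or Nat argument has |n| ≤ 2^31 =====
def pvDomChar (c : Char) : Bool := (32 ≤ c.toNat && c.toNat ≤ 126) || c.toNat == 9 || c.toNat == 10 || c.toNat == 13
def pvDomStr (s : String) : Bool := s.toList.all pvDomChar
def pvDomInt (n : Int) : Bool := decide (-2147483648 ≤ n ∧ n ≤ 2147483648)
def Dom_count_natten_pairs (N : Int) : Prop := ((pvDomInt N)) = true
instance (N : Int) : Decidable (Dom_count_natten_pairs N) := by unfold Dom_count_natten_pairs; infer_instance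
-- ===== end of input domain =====

-- B replaces A's inner scan over all N keys by a closed-form per-row count of each
-- query's mask box rows (asymptotically faster; equivalence proved for all N).

-- ===== PORT A =====
def pvG_H : Int := 128
def pvG_W : Int := 128
def pvK_H : Int := 13
def pvK_W : Int := 13

def get_x_y (idx : Int) : Int × Int :=
  (PySem.Int.floordiv idx pvG_W, PySem.Int.mod idx pvG_W)

def count_natten_pairs (N : Int) : Int :=
  (PySem.List.pyRange 0 N 1).foldl (fun count q_idx =>
    let qp := get_x_y q_idx
    let kernel_x := min (max qp.1 (PySem.Int.floordiv pvK_W 2)) ((pvG_W - 1) - PySem.Int.floordiv pvK_W 2)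
    let kernel_y := min (max qp.2 (PySem.Int.floordiv pvK_H 2)) ((pvG_H - 1) - PySem.Int.floordiv pvK_H 2)
    (PySem.List.pyRange 0 N 1).foldl (fun c kv_idx =>
      let kp := get_x_y kv_idx
      let hori_mask := decide (|kernel_x - kp.1| ≤ PySem.Int.floordiv pvK_W 2)
      let vert_mask := decide (|kernel_y - kp.2| ≤ PySem.Int.floordiv pvK_H 2)
      if hori_mask && vert_mask then c + 1 else c) count) 0

-- ===== PORT B =====
def count_natten_pairs_alt (N : Int) : Int :=
  let r_k := PySem.Int.floordiv pvK_W 2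
  let r_h := PySem.Int.floordiv pvK_H 2
  (PySem.List.pyRange 0 N 1).foldl (fun count q_idx =>
    let q_x := PySem.Int.floordiv q_idx pvG_W
    let q_y := PySem.Int.mod q_idx pvG_W
    let kernel_x := min (max q_x r_k) ((pvG_W - 1) - r_k)
    let kernel_y := min (max q_y r_h) ((pvG_H - 1) - r_h)
    let c0 := kernel_y - r_h
    (PySem.List.pyRange (kernel_x - r_k) (kernel_x + r_k + 1) 1).foldl (fun c r =>
      c + min (max (N - (r * pvG_W + c0)) 0) pvK_H) count) 0

-- ===== PRECONDITION & SPEC =====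
def Spec_count_natten_pairs (N : Int) (out : Int) : Prop := out = count_natten_pairs_alt N
instance (N : Int) (out : Int) : Decidable (Spec_count_natten_pairs N out) := by unfold Spec_count_natten_pairs; infer_instance

-- ===== CLAIM (what is proved, stated in full; the proofs are below) =====
def Claim_equal_count_natten_pairs : Prop := ∀ (N : Int), Dom_count_natten_pairs N → Spec_count_natten_pairs N (count_natten_pairs N)

-- ===== LEMMAS AND PROOFS =====

-- one row's block count gains exactly the indicator of "key N lies in row r's block" when N grows by 1
theorem pvRowTermSucc (N c0 r : Int) (_hN : 0 ≤ N) (hc0 : 0 ≤ c0) (hc1 : c0 + 12 ≤ 127) :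
    min (max (N + 1 - (r * 128 + c0)) 0) 13
      = min (max (N - (r * 128 + c0)) 0) 13
        + (if r = N / 128 ∧ c0 ≤ N % 128 ∧ N % 128 ≤ c0 + 12 then 1 else 0) := by
  split_ifs with h <;> omega

-- sum over a range of the indicator of one value
theorem pvSumInd (r0 a b : Int) :
    ((PySem.List.pyRange a b 1).map (fun r => if r = r0 then (1 : Int) else 0)).sum
      = if a ≤ r0 ∧ r0 < b then 1 else 0 := by
  have H : ∀ c : Int, a ≤ c →
      ((PySem.List.pyRange a c 1).map (fun r => if r = r0 then (1 : Int) else 0)).sum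
        = if a ≤ r0 ∧ r0 < c then 1 else 0 := by
    intro c hc
    induction c, hc using Int.le_induction with
    | base =>
      rw [PySem.List.pyRange_one_eq_nil le_rfl]
      simp only [List.map_nil, List.sum_nil]
      rw [if_neg (by omega)]
    | succ c hc ih =>
      rw [PySem.List.pyRange_one_succ_right hc, List.map_append, List.sum_append, ih]
      simp only [List.map_cons, List.map_nil, List.sum_cons, List.sum_nil]
      split_ifs <;> omega
  by_cases h : a ≤ b
  · exact H b h
  · rw [PySem.List.pyRange_one_eq_nil (by omega)]
    simp only [List.map_nil, List.sum_nil]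
    rw [if_neg (by omega)]

-- the whole box-row sum gains exactly the indicator of the full mask condition
theorem pvRowSumSucc (N kx c0 : Int) (hN : 0 ≤ N) (hc0 : 0 ≤ c0) (hc1 : c0 + 12 ≤ 127) :
    ((PySem.List.pyRange (kx - 6) (kx + 7) 1).map
        (fun r => min (max (N + 1 - (r * 128 + c0)) 0) 13)).sum
      = ((PySem.List.pyRange (kx - 6) (kx + 7) 1).map
          (fun r => min (max (N - (r * 128 + c0)) 0) 13)).sum
        + (if kx - 6 ≤ N / 128 ∧ N / 128 < kx + 7 ∧ c0 ≤ N % 128 ∧ N % 128 ≤ c0 + 12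
            then 1 else 0) := by
  by_cases hQ : c0 ≤ N % 128 ∧ N % 128 ≤ c0 + 12
  · have h1 : ((PySem.List.pyRange (kx - 6) (kx + 7) 1).map
        (fun r => min (max (N + 1 - (r * 128 + c0)) 0) 13)).sum
        = ((PySem.List.pyRange (kx - 6) (kx + 7) 1).map
            (fun r => min (max (N - (r * 128 + c0)) 0) 13
              + (if r = N / 128 then 1 else 0))).sum := by
      apply congrArg
      apply List.map_congr_left
      intro r _
      rw [pvRowTermSucc N c0 r hN hc0 hc1]
      simp only [hQ.1, hQ.2, and_true]
    rw [h1, PySem.List.sum_map_add_int, pvSumInd]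
    congr 1
    apply if_congr _ rfl rfl
    constructor
    · intro hx; exact ⟨hx.1, hx.2, hQ.1, hQ.2⟩
    · intro hx; exact ⟨hx.1, hx.2.1⟩
  · have h1 : ((PySem.List.pyRange (kx - 6) (kx + 7) 1).map
        (fun r => min (max (N + 1 - (r * 128 + c0)) 0) 13)).sum
        = ((PySem.List.pyRange (kx - 6) (kx + 7) 1).map
            (fun r => min (max (N - (r * 128 + c0)) 0) 13)).sum := by
      apply congrArg
      apply List.map_congr_left
      intro r _
      rw [pvRowTermSucc N c0 r hN hc0 hc1, if_neg (fun h => hQ h.2), add_zero]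
    rw [h1, if_neg (fun h => hQ ⟨h.2.2.1, h.2.2.2⟩), add_zero]

-- for non-positive N the row sum vanishes
theorem pvRowSumZero (N kx c0 : Int) (hN : N ≤ 0) (hkx : 6 ≤ kx) (hc0 : 0 ≤ c0) :
    ((PySem.List.pyRange (kx - 6) (kx + 7) 1).map
        (fun r => min (max (N - (r * 128 + c0)) 0) 13)).sum = 0 := by
  apply List.sum_eq_zero
  intro x hx
  rcases List.mem_map.mp hx with ⟨r, hr, rfl⟩
  have := PySem.List.mem_pyRange_one.mp hr
  omega

-- the heart: A's inner scan counts exactly B's closed-form row blocks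
theorem pvInnerEq (kx ky : Int) (hkx1 : 6 ≤ kx) (_hkx2 : kx ≤ 121)
    (hky1 : 6 ≤ ky) (hky2 : ky ≤ 121) (N : Int) :
    (((PySem.List.pyRange 0 N 1).countP
        (fun kv => decide (|kx - kv / 128| ≤ 6) && decide (|ky - kv % 128| ≤ 6))) : Int)
      = ((PySem.List.pyRange (kx - 6) (kx + 7) 1).map
          (fun r => min (max (N - (r * 128 + (ky - 6))) 0) 13)).sum := by
  have H : ∀ M : Int, 0 ≤ M →
      (((PySem.List.pyRange 0 M 1).countP
          (fun kv => decide (|kx - kv / 128| ≤ 6) && decide (|ky - kv % 128| ≤ 6))) : Int)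
        = ((PySem.List.pyRange (kx - 6) (kx + 7) 1).map
            (fun r => min (max (M - (r * 128 + (ky - 6))) 0) 13)).sum := by
    intro M hM
    induction M, hM using Int.le_induction with
    | base =>
      rw [PySem.List.pyRange_one_eq_nil le_rfl,
        pvRowSumZero 0 kx (ky - 6) le_rfl hkx1 (by omega)]
      simp
    | succ M hM ih =>
      rw [PySem.List.pyRange_one_succ_right hM, List.countP_append,
        pvRowSumSucc M kx (ky - 6) hM (by omega) (by omega), ← ih]
      simp only [List.countP_cons, List.countP_nil, Nat.zero_add]
      push_cast
      congr 1
      by_cases hP : kx - 6 ≤ M / 128 ∧ M / 128 < kx + 7 ∧ ky - 6 ≤ M % 128 ∧ M % 128 ≤ ky - 6 + 12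
      · rw [if_pos hP, if_pos]
        simp only [Bool.and_eq_true, decide_eq_true_eq, abs_le]
        omega
      · rw [if_neg hP, if_neg]
        simp only [Bool.and_eq_true, decide_eq_true_eq, abs_le]
        omega
  by_cases h : 0 ≤ N
  · exact H N h
  · rw [PySem.List.pyRange_one_eq_nil (by omega),
      pvRowSumZero N kx (ky - 6) (by omega) hkx1 (by omega)]
    simp

-- ===== VERDICT (by name: the statement is the Claim_ definition above) =====
theorem count_natten_pairs_spec : Claim_equal_count_natten_pairs := by
  intro N _
  unfold Spec_count_natten_pairs count_natten_pairs count_natten_pairs_alt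
  have hfd : PySem.Int.floordiv 13 2 = 6 := by decide
  congr 1
  funext count q_idx
  simp only [get_x_y, pvG_W, pvG_H, pvK_W, pvK_H, hfd,
    PySem.Int.floordiv_eq_ediv_of_pos (by norm_num : (0:Int) < 128),
    PySem.Int.mod_eq_emod_of_pos (by norm_num : (0:Int) < 128)]
  rw [PySem.List.foldl_count_if, PySem.List.foldl_add]
  rw [pvInnerEq (min (max (q_idx / 128) 6) (128 - 1 - 6)) (min (max (q_idx % 128) 6) (128 - 1 - 6))
    (by omega) (by omega) (by omega) (by omega) N]
  rw [show (min (max (q_idx / 128) 6) (128 - 1 - 6) + 6 + 1 : Int)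
      = min (max (q_idx / 128) 6) (128 - 1 - 6) + 7 from by omega]
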